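-- pv_equiv track=rewrite | github.com/Mr-Bossman/wacom_tablet | python/printadc.py | cleanme
-- ===== SOURCE A (Python) =====
-- def cleanme(arr):
-- 	maxed = -1
-- 	for i in range(len(arr)):
-- 		if(maxed != -1):
-- 			if(arr[i] > maxed):
-- 				arr[i] = arr[i-1]
-- 			maxed = arr[i]
-- 		if (arr[i] == max(arr)):
-- 			maxed = arr[i]
-- 	maxed = -1
-- 	for i in reversed(range(len(arr))):
-- 		if(maxed != -1):
-- 			if(arr[i] > maxed):
-- 				arr[i] = arr[i+1]
-- 			maxed = arr[i]
-- 		if (arr[i] == max(arr)):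
-- 			maxed = arr[i]
-- 	return arr
-- ===== SOURCE B (Python) =====
-- # B: locate the peak once, then enforce a running minimum after it in each direction.
-- def _clamp_after_peak(xs, m):
--     k = xs.index(m)
--     out = xs[:k + 1]
--     lo = m
--     for x in xs[k + 1:]:
--         lo = min(x, lo)
--         out.append(lo)
--     return out
--
-- def cleanme(arr):
--     if arr:
--         m = max(arr)
--         tmp = _clamp_after_peak(arr, m)
--         arr[:] = list(reversed(_clamp_after_peak(list(reversed(tmp)), m)))
--     return arr
-- ===== Notes on version B (the rewrite author's own statement) =====
-- stated objective: faster
-- what changed: B finds the index of the maximum once and enforces a running minimum after the peak in each direction, replacing A's stateful clamp loops that rescan max(arr) on every iteration; Pre_ excludes arrays containing -1, A's in-band inactive-sentinel value, where the sentinel collides with the data and neither deactivating (A) nor continuing to clamp (B) is specified.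
-- outside the precondition, e.g. on cleanme([5, -1, 3]): A returns [5, -1, 3], B returns [5, -1, -1]
import Mathlib
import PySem

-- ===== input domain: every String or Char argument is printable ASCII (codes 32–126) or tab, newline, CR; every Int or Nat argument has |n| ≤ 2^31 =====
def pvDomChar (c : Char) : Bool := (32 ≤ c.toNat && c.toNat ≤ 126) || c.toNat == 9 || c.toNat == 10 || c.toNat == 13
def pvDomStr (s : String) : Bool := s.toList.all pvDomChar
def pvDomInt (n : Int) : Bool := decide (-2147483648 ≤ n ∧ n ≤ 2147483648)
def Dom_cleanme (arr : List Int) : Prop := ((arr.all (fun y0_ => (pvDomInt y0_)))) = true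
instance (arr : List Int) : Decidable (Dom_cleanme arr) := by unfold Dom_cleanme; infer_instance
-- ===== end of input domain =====

-- B finds the index of the maximum once and enforces a running minimum after the peak in each
-- direction (O(n)), instead of A's stateful clamp loops that rescan max(arr) every iteration.
-- Python A mutates arr in place; Python B performs the same in-place update, so the return-value
-- equivalence proved here covers the observable effect as well.

-- ===== PORT A =====
-- max(arr); the default 0 is never used: it is only called on nonempty lists (inside the loops).
def pyMaxD (a : List Int) : Int := (PySem.List.max? a (fun y => y)).getD 0

def cleanmeStep1 (st : List Int × Int) (i : Int) : List Int × Int :=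
  let a := st.1
  let maxed := st.2
  let p := if maxed ≠ -1 then
      let a' := if PySem.List.pyGetD a i 0 > maxed
                then PySem.List.pySetD a i (PySem.List.pyGetD a (i - 1) 0) else a
      (a', PySem.List.pyGetD a' i 0)
    else (a, maxed)
  let a := p.1
  let maxed := p.2
  let maxed := if PySem.List.pyGetD a i 0 = pyMaxD a then PySem.List.pyGetD a i 0 else maxed
  (a, maxed)

def cleanmeStep2 (st : List Int × Int) (i : Int) : List Int × Int :=
  let a := st.1
  let maxed := st.2
  let p := if maxed ≠ -1 then
      let a' := if PySem.List.pyGetD a i 0 > maxed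
                then PySem.List.pySetD a i (PySem.List.pyGetD a (i + 1) 0) else a
      (a', PySem.List.pyGetD a' i 0)
    else (a, maxed)
  let a := p.1
  let maxed := p.2
  let maxed := if PySem.List.pyGetD a i 0 = pyMaxD a then PySem.List.pyGetD a i 0 else maxed
  (a, maxed)

def cleanme (arr : List Int) : List Int :=
  let n : Int := arr.length
  let st1 := (PySem.List.pyRange 0 n 1).foldl cleanmeStep1 (arr, -1)
  let st2 := ((PySem.List.pyRange 0 n 1).reverse).foldl cleanmeStep2 (st1.1, -1)
  st2.1

-- ===== PORT B =====
-- the 'for x in xs[k+1:]' loop of _clamp_after_peak, carrying lo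
def runMinB : List Int → Int → List Int
  | [], _ => []
  | x :: xs, lo => let lo' := min x lo; lo' :: runMinB xs lo'

-- _clamp_after_peak(xs, m); m = max(xs) ∈ xs in every call, so xs.index(m) never raises;
-- the none branch is unreachable (Python would raise ValueError there).
def clampAfterPeak (xs : List Int) (m : Int) : List Int :=
  match PySem.List.index? xs m with
  | none => xs
  | some k => xs.take (k + 1) ++ runMinB (xs.drop (k + 1)) m

def cleanme_alt (arr : List Int) : List Int :=
  match PySem.List.max? arr (fun y => y) with
  | none => arr
  | some m =>
      let tmp := clampAfterPeak arr m
      (clampAfterPeak tmp.reverse m).reverse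

-- ===== PRECONDITION & SPEC =====
-- Pre_ excludes arrays containing -1: A uses -1 as its in-band "inactive" sentinel, so on arrays
-- containing -1 the sentinel collides with the data and no particular smoothing behaviour is
-- specified there (A deactivates mid-array, B keeps clamping; both are defensible).
def Pre_cleanme (arr : List Int) : Prop := (-1 : Int) ∉ arr
instance (arr : List Int) : Decidable (Pre_cleanme arr) := by unfold Pre_cleanme; infer_instance

def pvWitness_cleanme : List Int := [3, 7, 5]

def Spec_cleanme (arr : List Int) (out : List Int) : Prop := out = cleanme_alt arr
instance (arr : List Int) (out : List Int) : Decidable (Spec_cleanme arr out) := by unfold Spec_cleanme; infer_instance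

-- ===== CLAIM =====
def Claim_equal_cleanme : Prop := ∀ (arr : List Int), Dom_cleanme arr → Pre_cleanme arr → Spec_cleanme arr (cleanme arr)

-- ===== LEMMAS AND PROOFS =====

-- Proof-internal state machine describing A's two loops: one forward pass with a prev/active
-- accumulator.  loop1_eq/loop2_eq characterise A's folds as passB; then passB is shown to equal
-- B's index-of-max + running-minimum computation on inputs without -1.
def passB (m : Int) : List Int → Int → Bool → List Int
  | [], _, _ => []
  | x :: xs, prev, active =>
      let x' := if active && decide (x > prev) then prev else x
      x' :: passB m xs x' (decide (x' ≠ -1) && (active || decide (x' = m)))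

lemma pyMaxD_eq (a : List Int) (M : Int) (hmem : M ∈ a) (hle : ∀ x ∈ a, x ≤ M) :
    pyMaxD a = M := by
  cases h : PySem.List.max? a (fun y => y) with
  | none =>
      rw [PySem.List.max?_eq_none_iff] at h
      simp [h] at hmem
  | some m =>
      have h1 : m ∈ a := PySem.List.max?_mem h
      have h2 := PySem.List.max?_isMax h M hmem
      simp only [pyMaxD, h, Option.getD_some]
      exact le_antisymm (hle m h1) h2

lemma passB_le (M : Int) : ∀ (xs : List Int) (prev : Int) (active : Bool),
    (∀ x ∈ xs, x ≤ M) → (active = true → prev ≤ M) →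
    ∀ y ∈ passB M xs prev active, y ≤ M := by
  intro xs
  induction xs with
  | nil => intro _ _ _ _ y hy; simp [passB] at hy
  | cons x xs ih =>
      intro prev active hxs hprev y hy
      simp only [passB, List.mem_cons] at hy
      have hx : x ≤ M := hxs x (by simp)
      have hx' : (if active && decide (x > prev) then prev else x) ≤ M := by
        split
        · rename_i h; simp at h; exact hprev h.1
        · exact hx
      rcases hy with rfl | hy
      · exact hx'
      · exact ih _ _ (fun z hz => hxs z (by simp [hz])) (fun _ => hx') y hy

lemma passB_hasM (M : Int) : ∀ (xs : List Int) (prev : Int),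
    M ∈ xs → M ∈ passB M xs prev false := by
  intro xs
  induction xs with
  | nil => intro _ h; simp at h
  | cons x xs ih =>
      intro prev h
      by_cases hx : x = M
      · simp [passB, hx]
      · simp only [List.mem_cons] at h
        rcases h with rfl | h
        · exact absurd rfl hx
        · have hM : M ∈ passB M xs x false := ih x h
          simp [passB, hx, hM]

-- indexing helpers at the seam between processed and unprocessed parts
lemma pyGetD_append_prev (done xs : List Int) (x d prev : Int)
    (h : done.getLast? = some prev) :
    PySem.List.pyGetD (done ++ x :: xs) ((done.length : Int) - 1) d = prev := by
  have hne : done ≠ [] := by intro e; simp [e] at h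
  have hpos : 0 < done.length := List.length_pos_iff.mpr hne
  have h1 : ((done.length : Int) - 1) = ((done.length - 1 : Nat) : Int) := by omega
  rw [h1, PySem.List.pyGetD_natCast, List.getD_eq_getElem?_getD,
      List.getElem?_append_left (by omega), List.getElem?_eq_getElem (by omega)]
  have h2 := List.getLast?_eq_some_getLast hne
  rw [h] at h2
  have h3 : done[done.length - 1]'(by omega) = done.getLast hne :=
    List.getElem_length_sub_one_eq_getLast (by omega)
  rw [Option.getD_some, h3]
  exact (Option.some_inj.mp h2).symm

lemma pyGetD_append_next (ys rest : List Int) (x d prev : Int) :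
    PySem.List.pyGetD (ys ++ x :: prev :: rest) ((ys.length : Int) + 1) d = prev := by
  have h1 : ((ys.length : Int) + 1) = ((ys.length + 1 : Nat) : Int) := by omega
  rw [h1, PySem.List.pyGetD_natCast, List.getD_eq_getElem?_getD,
      List.getElem?_append_right (by omega)]
  simp

lemma loop1_eq (M : Int) : ∀ (rest done : List Int) (prev : Int) (active : Bool),
    (∀ x ∈ done ++ rest, x ≤ M) → M ∈ done ++ rest →
    (active = true → done.getLast? = some prev ∧ prev ≠ -1 ∧ M ∈ done) →
    ((PySem.List.pyRange (done.length : Int) (((done ++ rest).length : Nat) : Int) 1).foldl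
        cleanmeStep1 (done ++ rest, if active then prev else -1)).1
      = done ++ passB M rest prev active := by
  intro rest
  induction rest with
  | nil =>
      intro done prev active _ _ _
      rw [PySem.List.pyRange_one_eq_nil (by simp)]
      simp [passB]
  | cons x xs ih =>
      intro done prev active hle hmem hact
      have hx : x ≤ M := hle x (by simp)
      have hcons : PySem.List.pyRange (done.length : Int) (((done ++ x :: xs).length : Nat) : Int) 1
          = (done.length : Int) :: PySem.List.pyRange ((done.length : Int) + 1) (((done ++ x :: xs).length : Nat) : Int) 1 :=
        PySem.List.pyRange_one_cons (by simp)
      rw [hcons, List.foldl_cons]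
      cases active with
      | false =>
          have hmax : pyMaxD (done ++ x :: xs) = M := pyMaxD_eq _ M hmem hle
          have hstep : cleanmeStep1 (done ++ x :: xs, if false then prev else -1) (done.length : Int)
              = (done ++ x :: xs, if x = M then x else -1) := by
            simp [cleanmeStep1, hmax]
          rw [hstep]
          have hIH := ih (done ++ [x]) x (decide (x ≠ -1) && (false || decide (x = M)))
            (by simpa using hle) (by simpa using hmem)
            (by
              intro hA
              simp only [Bool.false_or, Bool.and_eq_true, decide_eq_true_eq] at hA
              exact ⟨by simp, hA.1, by simp [hA.2]⟩)
          have hinit : (if (decide (x ≠ -1) && (false || decide (x = M))) = true then x else -1)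
              = (if x = M then x else -1) := by
            by_cases hxM : x = M
            · subst hxM
              by_cases hx1 : x = -1 <;> simp [hx1]
            · simp [hxM]
          rw [hinit] at hIH
          rw [passB]
          simp only [Bool.false_and, Bool.false_or, if_neg Bool.false_ne_true]
          simp only [List.append_assoc, List.cons_append, List.nil_append,
            List.length_append, List.length_cons, List.length_nil] at hIH ⊢
          have harith : ((done.length + 1 : Nat) : Int) = (done.length : Int) + 1 := by push_cast; ring
          rw [harith] at hIH
          convert hIH using 3
      | true =>
          obtain ⟨hlast, hprev1, hMdone⟩ := hact rfl
          have hprevle : prev ≤ M := hle prev (by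
            have : prev ∈ done := List.mem_of_getLast? hlast
            simp [this])
          set x' : Int := if x > prev then prev else x with hx'
          have hx'le : x' ≤ M := by rw [hx']; split <;> [exact hprevle; exact hx]
          have hle' : ∀ y ∈ done ++ x' :: xs, y ≤ M := by
            intro y hy
            rcases (by simpa using hy : y ∈ done ∨ y = x' ∨ y ∈ xs) with h | h | h
            · exact hle y (by simp [h])
            · exact h ▸ hx'le
            · exact hle y (by simp [h])
          have hmem' : M ∈ done ++ x' :: xs := by simp [hMdone]
          have hmax : pyMaxD (done ++ x' :: xs) = M := pyMaxD_eq _ M hmem' hle'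
          have hstep : cleanmeStep1 (done ++ x :: xs, if true then prev else -1) (done.length : Int)
              = (done ++ x' :: xs, x') := by
            by_cases hc : x > prev
            · have hxx : x' = prev := by rw [hx', if_pos hc]
              have hmaxb := hmax
              rw [hxx] at hmaxb
              simp [cleanmeStep1, hprev1, hc, pyGetD_append_prev done xs x 0 prev hlast, hmaxb, hxx]
            · have hxx : x' = x := by rw [hx', if_neg hc]
              have hmaxb := hmax
              rw [hxx] at hmaxb
              simp [cleanmeStep1, hprev1, hc, hmaxb, hxx]
          rw [hstep]
          have hIH := ih (done ++ [x']) x' (decide (x' ≠ -1) && (true || decide (x' = M)))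
            (by simpa using hle') (by simpa using hmem')
            (by
              intro hA
              simp only [Bool.true_or, Bool.and_true, decide_eq_true_eq] at hA
              exact ⟨by simp, hA, by simp [hMdone]⟩)
          have hinit : (if (decide (x' ≠ -1) && (true || decide (x' = M))) = true then x' else -1)
              = x' := by
            by_cases hx1 : x' = -1 <;> simp [hx1]
          rw [hinit] at hIH
          rw [passB]
          have hxg : (if (true && decide (x > prev)) = true then prev else x) = x' := by
            rw [hx']
            simp
          rw [hxg]
          simp only [List.append_assoc, List.cons_append, List.nil_append,
            List.length_append, List.length_cons, List.length_nil] at hIH ⊢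
          have harith : ((done.length + 1 : Nat) : Int) = (done.length : Int) + 1 := by push_cast; ring
          rw [harith] at hIH
          convert hIH using 3

lemma loop2_eq (M : Int) : ∀ (rest done : List Int) (prev : Int) (active : Bool),
    (∀ x ∈ rest ++ done, x ≤ M) → M ∈ rest ++ done →
    (active = true → done.head? = some prev ∧ prev ≠ -1 ∧ M ∈ done) →
    (((PySem.List.pyRange 0 ((rest.length : Nat) : Int) 1).reverse).foldl
        cleanmeStep2 (rest ++ done, if active then prev else -1)).1
      = (passB M rest.reverse prev active).reverse ++ done := by
  intro rest
  induction rest using List.reverseRecOn with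
  | nil =>
      intro done prev active _ _ _
      simp [passB]
  | append_singleton ys x ih =>
      intro done prev active hle hmem hact
      have hx : x ≤ M := hle x (by simp)
      have hlen : (((ys ++ [x]).length : Nat) : Int) = (ys.length : Int) + 1 := by
        simp
      rw [hlen, PySem.List.pyRange_one_succ_right (by positivity), List.reverse_append,
        List.reverse_singleton, List.singleton_append, List.foldl_cons]
      have hsplit : (ys ++ [x]) ++ done = ys ++ x :: done := by simp
      rw [hsplit]
      cases active with
      | false =>
          have hmax : pyMaxD (ys ++ x :: done) = M := pyMaxD_eq _ M (by simpa using hmem) (by simpa using hle)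
          have hstep : cleanmeStep2 (ys ++ x :: done, if false then prev else -1) (ys.length : Int)
              = (ys ++ x :: done, if x = M then x else -1) := by
            simp [cleanmeStep2, hmax]
          rw [hstep]
          have hIH := ih (x :: done) x (decide (x ≠ -1) && (false || decide (x = M)))
            (by simpa using hle) (by simpa using hmem)
            (by
              intro hA
              simp only [Bool.false_or, Bool.and_eq_true, decide_eq_true_eq] at hA
              exact ⟨rfl, hA.1, by simp [hA.2]⟩)
          have hinit : (if (decide (x ≠ -1) && (false || decide (x = M))) = true then x else -1)
              = (if x = M then x else -1) := by
            by_cases hxM : x = M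
            · subst hxM
              by_cases hx1 : x = -1 <;> simp [hx1]
            · simp [hxM]
          rw [hinit] at hIH
          rw [List.reverse_append, List.reverse_singleton, List.singleton_append, passB]
          simp only [Bool.false_and, Bool.false_or, if_neg Bool.false_ne_true]
          rw [hIH]
          simp
      | true =>
          obtain ⟨hhead, hprev1, hMdone⟩ := hact rfl
          obtain ⟨drest, rfl⟩ : ∃ t, done = prev :: t := by
            cases done with
            | nil => simp at hhead
            | cons a t =>
                simp only [List.head?_cons, Option.some_inj] at hhead
                exact ⟨t, by rw [hhead]⟩
          have hprevle : prev ≤ M := hle prev (by simp)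
          set x' : Int := if x > prev then prev else x with hx'
          have hx'le : x' ≤ M := by rw [hx']; split <;> [exact hprevle; exact hx]
          have hle' : ∀ y ∈ ys ++ x' :: prev :: drest, y ≤ M := by
            intro y hy
            rcases (by simpa using hy : y ∈ ys ∨ y = x' ∨ y = prev ∨ y ∈ drest) with h | h | h
            · exact hle y (by simp [h])
            · exact h ▸ hx'le
            · exact hle y (by simp [h])
          have hmem' : M ∈ ys ++ x' :: prev :: drest := by
            rcases (by simpa using hMdone : M = prev ∨ M ∈ drest) with h | h <;> simp [h]
          have hmax : pyMaxD (ys ++ x' :: prev :: drest) = M := pyMaxD_eq _ M hmem' hle'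
          have hstep : cleanmeStep2 (ys ++ x :: prev :: drest, if true then prev else -1) (ys.length : Int)
              = (ys ++ x' :: prev :: drest, x') := by
            by_cases hc : x > prev
            · have hxx : x' = prev := by rw [hx', if_pos hc]
              have hmaxb := hmax
              rw [hxx] at hmaxb
              simp [cleanmeStep2, hprev1, hc, pyGetD_append_next ys drest x 0 prev, hmaxb, hxx]
            · have hxx : x' = x := by rw [hx', if_neg hc]
              have hmaxb := hmax
              rw [hxx] at hmaxb
              simp [cleanmeStep2, hprev1, hc, hmaxb, hxx]
          rw [hstep]
          have hIH := ih (x' :: prev :: drest) x' (decide (x' ≠ -1) && (true || decide (x' = M)))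
            (by simpa using hle') (by simpa using hmem')
            (by
              intro hA
              simp only [Bool.true_or, Bool.and_true, decide_eq_true_eq] at hA
              refine ⟨rfl, hA, ?_⟩
              rcases (by simpa using hMdone : M = prev ∨ M ∈ drest) with h | h <;> simp [h])
          have hinit : (if (decide (x' ≠ -1) && (true || decide (x' = M))) = true then x' else -1)
              = x' := by
            by_cases hx1 : x' = -1 <;> simp [hx1]
          rw [hinit] at hIH
          rw [List.reverse_append, List.reverse_singleton, List.singleton_append, passB]
          have hxg : (if (true && decide (x > prev)) = true then prev else x) = x' := by
            rw [hx']
            simp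
          rw [hxg, hIH]
          simp

-- on -1-free input, the active phase of A's pass is exactly B's running minimum
lemma passB_active_eq_runMin (M : Int) : ∀ (xs : List Int) (lo : Int),
    (-1 : Int) ∉ xs → lo ≠ -1 → passB M xs lo true = runMinB xs lo := by
  intro xs
  induction xs with
  | nil => intro _ _ _; rfl
  | cons x xs ih =>
      intro lo hxs hlo
      have hx : x ≠ -1 := by intro e; exact hxs (by simp [e])
      have hmin : (if (true && decide (x > lo)) = true then lo else x) = min x lo := by
        by_cases h : x > lo
        · simp [h, min_def, show ¬ x ≤ lo by omega]
        · simp [h, show x ≤ lo by omega]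
      have hmin1 : min x lo ≠ -1 := by
        by_cases h : x ≤ lo
        · simpa [min_def, h] using hx
        · simpa [min_def, h] using hlo
      rw [passB, runMinB, hmin]
      have hact : (decide (min x lo ≠ -1) && (true || decide (min x lo = M))) = true := by
        simp [hmin1]
      rw [hact, ih (min x lo) (fun h => hxs (by simp [h])) hmin1]

-- on -1-free input, A's pass is B's _clamp_after_peak
lemma passB_eq_clamp (M : Int) (hM : M ≠ -1) : ∀ (xs : List Int) (prev : Int),
    (-1 : Int) ∉ xs → passB M xs prev false = clampAfterPeak xs M := by
  intro xs
  induction xs with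
  | nil => intro _ _; rfl
  | cons x xs ih =>
      intro prev hxs
      have hx : x ≠ -1 := by intro e; exact hxs (by simp [e])
      have hxs' : (-1 : Int) ∉ xs := fun h => hxs (by simp [h])
      by_cases hxM : x = M
      · subst hxM
        have hstep : passB x (x :: xs) prev false = x :: passB x xs x true := by
          rw [passB]; simp [hx]
        rw [hstep, passB_active_eq_runMin x xs x hxs' hx,
          clampAfterPeak, PySem.List.index?_cons_self]
        simp
      · have hstep : passB M (x :: xs) prev false = x :: passB M xs x false := by
          rw [passB]; simp [hxM]
        rw [hstep, ih x hxs', clampAfterPeak, clampAfterPeak,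
          PySem.List.index?_cons_of_ne xs hxM]
        cases h : PySem.List.index? xs M with
        | none => simp
        | some k => simp

lemma runMinB_mem : ∀ (xs : List Int) (lo y : Int), y ∈ runMinB xs lo → y ∈ xs ∨ y = lo := by
  intro xs
  induction xs with
  | nil => intro lo y hy; simp [runMinB] at hy
  | cons x xs ih =>
      intro lo y hy
      simp only [runMinB, List.mem_cons] at hy
      rcases hy with rfl | hy
      · by_cases h : x ≤ lo <;> simp [min_def, h]
      · rcases ih (min x lo) y hy with h | h
        · exact Or.inl (by simp [h])
        · by_cases h2 : x ≤ lo <;> simp [min_def, h2] at h <;> simp [h]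

lemma clamp_no_neg_one (xs : List Int) (M : Int) (hxs : (-1 : Int) ∉ xs) (hM : M ≠ -1) :
    (-1 : Int) ∉ clampAfterPeak xs M := by
  unfold clampAfterPeak
  cases h : PySem.List.index? xs M with
  | none => exact hxs
  | some k =>
      intro hmem
      rcases List.mem_append.mp hmem with h1 | h1
      · exact hxs (List.mem_of_mem_take h1)
      · rcases runMinB_mem _ _ _ h1 with h2 | h2
        · exact hxs (List.mem_of_mem_drop h2)
        · exact hM h2.symm

-- ===== VERDICT (by name: the statement is the Claim_ definition above) =====
theorem cleanme_spec : Claim_equal_cleanme := by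
  unfold Claim_equal_cleanme Spec_cleanme Pre_cleanme
  intro arr _ hpre
  cases harr : PySem.List.max? arr (fun y => y) with
  | none =>
      have he : arr = [] := (PySem.List.max?_eq_none_iff arr (fun y => y)).mp harr
      subst he
      simp [cleanme, cleanme_alt, harr]
  | some M =>
      have hmem : M ∈ arr := PySem.List.max?_mem harr
      have hle : ∀ x ∈ arr, x ≤ M := fun x hx => PySem.List.max?_isMax harr x hx
      have hMne : M ≠ -1 := by intro e; exact hpre (e ▸ hmem)
      have h1 := loop1_eq M arr [] 0 false (by simpa using hle) (by simpa using hmem)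
        (by intro h; exact absurd h (by simp))
      have hfle : ∀ y ∈ passB M arr 0 false, y ≤ M :=
        passB_le M arr 0 false hle (by intro h; exact absurd h (by simp))
      have hfmem : M ∈ passB M arr 0 false := passB_hasM M arr 0 hmem
      have h2 := loop2_eq M (passB M arr 0 false) [] 0 false
        (by simpa using hfle) (by simpa using hfmem) (by intro h; exact absurd h (by simp))
      have hfwd : passB M arr 0 false = clampAfterPeak arr M := passB_eq_clamp M hMne arr 0 hpre
      have hno1 : (-1 : Int) ∉ (clampAfterPeak arr M).reverse := by
        intro h
        exact clamp_no_neg_one arr M hpre hMne (List.mem_reverse.mp h)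
      have hbwd : passB M (clampAfterPeak arr M).reverse 0 false
          = clampAfterPeak (clampAfterPeak arr M).reverse M :=
        passB_eq_clamp M hMne _ 0 hno1
      have hlen : (passB M arr 0 false).length = arr.length := by
        rw [hfwd]
        unfold clampAfterPeak
        cases h : PySem.List.index? arr M with
        | none => rfl
        | some k =>
            have hk : k < arr.length := (PySem.List.getElem_of_index?_eq_some h).1
            have hr : ∀ (ys : List Int) (lo : Int), (runMinB ys lo).length = ys.length := by
              intro ys
              induction ys with
              | nil => intro _; rfl
              | cons a t iht => intro lo; simp [runMinB, iht]
            simp [hr]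
            omega
      simp only [List.nil_append, List.append_nil, List.length_nil, Nat.cast_zero,
        Bool.false_eq_true, if_false] at h1 h2
      simp only [cleanme, cleanme_alt, harr, hlen] at h2 ⊢
      rw [h1, h2, hfwd, hbwd]
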